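-- pv_equiv track=rewrite | github.com/ealosev-ai/FalseFloor-pyRevit | lib/floor_audit.py | summarize_zone_membership
-- ===== SOURCE A (Python) =====
-- def summarize_ids(ids):
--     """Return count, stable unique ids, and duplicate ids."""
--     unique_ids = []
--     duplicate_ids = []
--     seen = set()
--     duplicate_seen = set()
--
--     for value in ids or []:
--         int_id = int(value)
--         if int_id in seen:
--             if int_id not in duplicate_seen:
--                 duplicate_seen.add(int_id)
--                 duplicate_ids.append(int_id)
--             continue
--         seen.add(int_id)
--         unique_ids.append(int_id)
--
--     return {
--         "count": len(ids or []),
--         "unique_ids": tuple(unique_ids),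
--         "duplicate_ids": tuple(sorted(duplicate_ids)),
--     }
--
-- def summarize_zone_membership(zone_ids, top_ids, bottom_ids, support_ids):
--     """Return zone ids missing from stored stringer/support ownership."""
--     allowed = set(summarize_ids(top_ids)["unique_ids"])
--     allowed.update(summarize_ids(bottom_ids)["unique_ids"])
--     allowed.update(summarize_ids(support_ids)["unique_ids"])
--     return tuple(
--         sorted(
--             int_id
--             for int_id in summarize_ids(zone_ids)["unique_ids"]
--             if int_id not in allowed
--         )
--     )
-- ===== SOURCE B (Python) =====
-- def summarize_zone_membership(zone_ids, top_ids, bottom_ids, support_ids):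
--     """Return zone ids missing from stored stringer/support ownership."""
--     zones = sorted(int(v) for v in (zone_ids or []))
--     owned = sorted([int(v) for v in (top_ids or [])] +
--                    [int(v) for v in (bottom_ids or [])] +
--                    [int(v) for v in (support_ids or [])])
--     out = []
--     j = 0
--     for i, z in enumerate(zones):
--         if i and z == zones[i - 1]:
--             continue  # duplicate zone id, already handled
--         while j < len(owned) and owned[j] < z:
--             j += 1
--         if j == len(owned) or owned[j] != z:
--             out.append(z)
--     return tuple(out)
-- ===== Notes on version B (the rewrite author's own statement) =====
-- stated objective: alternative
-- what changed: Replaces the hash-set bookkeeping (summarize_ids dedup helper + set difference) by a sort-and-merge algorithm: sort the zone list and the concatenated owner lists, then one two-pointer sweep that skips adjacent duplicate zones and emits each zone id not found in the sorted owned list, so no sets and no final sort of the result are needed.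
import Mathlib
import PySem

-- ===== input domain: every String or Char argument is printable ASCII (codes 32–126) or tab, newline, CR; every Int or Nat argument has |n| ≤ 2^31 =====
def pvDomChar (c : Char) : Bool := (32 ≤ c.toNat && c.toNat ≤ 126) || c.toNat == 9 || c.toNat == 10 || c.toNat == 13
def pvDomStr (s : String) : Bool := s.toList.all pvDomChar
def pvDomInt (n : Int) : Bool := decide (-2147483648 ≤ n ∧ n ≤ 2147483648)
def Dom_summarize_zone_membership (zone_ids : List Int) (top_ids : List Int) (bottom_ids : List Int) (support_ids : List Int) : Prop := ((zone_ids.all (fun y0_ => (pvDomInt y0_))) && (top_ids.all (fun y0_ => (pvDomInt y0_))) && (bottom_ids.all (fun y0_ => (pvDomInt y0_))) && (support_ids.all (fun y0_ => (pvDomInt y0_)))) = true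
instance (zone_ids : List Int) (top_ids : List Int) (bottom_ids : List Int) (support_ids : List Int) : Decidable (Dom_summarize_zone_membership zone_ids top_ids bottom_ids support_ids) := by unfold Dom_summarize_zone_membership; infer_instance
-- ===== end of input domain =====

-- B replaces A's hash-set dedup helper and set difference by sort-and-merge: sort zones and
-- the concatenated owner ids, then a two-pointer sweep emits each distinct zone id absent
-- from the owned list. Objective: alternative algorithm, same asymptotic cost.


-- ===== PORT A =====
-- summarize_ids returns a dict {"count": int, "unique_ids": tuple, "duplicate_ids": tuple};
-- ported as the triple (count, unique_ids, duplicate_ids). int(value) = value on Int inputs.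
def summarize_ids (ids : List Int) : Int × List Int × List Int :=
  let st := ids.foldl
    (fun (st : PySem.Set Int × List Int × PySem.Set Int × List Int) value =>
      let seen := st.1
      let unique_ids := st.2.1
      let duplicate_seen := st.2.2.1
      let duplicate_ids := st.2.2.2
      let int_id := value
      if seen.contains int_id then
        if !(duplicate_seen.contains int_id) then
          (seen, unique_ids, duplicate_seen.add int_id, duplicate_ids ++ [int_id])
        else st
      else
        (seen.add int_id, unique_ids ++ [int_id], duplicate_seen, duplicate_ids))
    (PySem.Set.empty, [], PySem.Set.empty, [])
  ((ids.length : Int), st.2.1, PySem.List.sorted st.2.2.2 (fun x => x) false)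

def summarize_zone_membership (zone_ids : List Int) (top_ids : List Int) (bottom_ids : List Int) (support_ids : List Int) : List Int :=
  let allowed := PySem.Set.ofList (summarize_ids top_ids).2.1
  let allowed := PySem.Set.update allowed (summarize_ids bottom_ids).2.1
  let allowed := PySem.Set.update allowed (summarize_ids support_ids).2.1
  PySem.List.sorted
    ((summarize_ids zone_ids).2.1.filter (fun int_id => !(allowed.contains int_id)))
    (fun x => x) false

-- ===== PORT B =====
-- the for/while two-pointer sweep of Source B: `prev` is zones[i-1] (none at i = 0); the while
-- loop advancing j over `owned` is the dropWhile, and the kept suffix is passed on (j persists).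
def pvMergeDiff : List Int → List Int → Option Int → List Int
  | [], _, _ => []
  | z :: zs, owned, prev =>
    if prev = some z then pvMergeDiff zs owned prev
    else
      let owned' := owned.dropWhile (fun x => decide (x < z))
      if owned'.head? = some z then pvMergeDiff zs owned' (some z)
      else z :: pvMergeDiff zs owned' (some z)

def summarize_zone_membership_alt (zone_ids : List Int) (top_ids : List Int) (bottom_ids : List Int) (support_ids : List Int) : List Int :=
  let zones := PySem.List.sorted zone_ids (fun x => x) false
  let owned := PySem.List.sorted (top_ids ++ bottom_ids ++ support_ids) (fun x => x) false
  pvMergeDiff zones owned none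

-- ===== PRECONDITION & SPEC =====
def Spec_summarize_zone_membership (zone_ids : List Int) (top_ids : List Int) (bottom_ids : List Int) (support_ids : List Int) (out : List Int) : Prop := out = summarize_zone_membership_alt zone_ids top_ids bottom_ids support_ids
instance (zone_ids : List Int) (top_ids : List Int) (bottom_ids : List Int) (support_ids : List Int) (out : List Int) : Decidable (Spec_summarize_zone_membership zone_ids top_ids bottom_ids support_ids out) := by unfold Spec_summarize_zone_membership; infer_instance

-- ===== CLAIM (what is proved, stated in full; the proofs are below) =====
def Claim_equal_summarize_zone_membership : Prop := ∀ (zone_ids : List Int) (top_ids : List Int) (bottom_ids : List Int) (support_ids : List Int), Dom_summarize_zone_membership zone_ids top_ids bottom_ids support_ids → Spec_summarize_zone_membership zone_ids top_ids bottom_ids support_ids (summarize_zone_membership zone_ids top_ids bottom_ids support_ids)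

-- ===== LEMMAS AND PROOFS =====

-- A-side: the fold in summarize_ids keeps seen = unique_ids, so unique_ids is the
-- set-update of the starting seen set (first occurrences, in order).
theorem pv_fold_unique (ids : List Int) (s : PySem.Set Int) (d : PySem.Set Int) (dl : List Int) :
    (ids.foldl
      (fun (st : PySem.Set Int × List Int × PySem.Set Int × List Int) value =>
        let seen := st.1
        let unique_ids := st.2.1
        let duplicate_seen := st.2.2.1
        let duplicate_ids := st.2.2.2
        let int_id := value
        if seen.contains int_id then
          if !(duplicate_seen.contains int_id) then
            (seen, unique_ids, duplicate_seen.add int_id, duplicate_ids ++ [int_id])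
          else st
        else
          (seen.add int_id, unique_ids ++ [int_id], duplicate_seen, duplicate_ids))
      (s, s, d, dl)).2.1 = PySem.Set.update s ids := by
  induction ids generalizing s d dl with
  | nil => simp [PySem.Set.update]
  | cons x xs ih =>
    simp only [List.foldl_cons, PySem.Set.update_cons]
    by_cases hx : x ∈ s
    · have hadd : PySem.Set.add s x = s := PySem.Set.add_of_mem hx
      by_cases hd : x ∈ d
      · simpa [hx, hd, hadd] using ih s d dl
      · simpa [hx, hd, hadd] using ih s (d.add x) (dl ++ [x])
    · have hadd : PySem.Set.add s x = s ++ [x] := PySem.Set.add_of_not_mem hx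
      have := ih (s.add x) d dl
      simpa [hx, hadd] using this

theorem unique_eq_ofList (ids : List Int) :
    (summarize_ids ids).2.1 = PySem.Set.ofList ids := by
  unfold summarize_ids
  have h := pv_fold_unique ids PySem.Set.empty PySem.Set.empty []
  simpa [PySem.Set.update_nil_left] using h

-- B-side: dropping the elements < z of a list does not change membership of any x ≥ z.
theorem pv_mem_dropWhile_lt (owned : List Int) (z x : Int) (hzx : z ≤ x) :
    x ∈ owned.dropWhile (fun t => decide (t < z)) ↔ x ∈ owned := by
  constructor
  · exact fun h => (List.dropWhile_sublist _).mem h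
  · intro h
    rw [← List.takeWhile_append_dropWhile (p := fun t => decide (t < z)) (l := owned)] at h
    rcases List.mem_append.mp h with h' | h'
    · have := List.mem_takeWhile_imp h'
      simp at this; omega
    · exact h'

-- B-side: on a sorted list, z is present iff the first element ≥ z equals z.
theorem pv_head_dropWhile_lt (owned : List Int) (z : Int) (how : owned.Pairwise (· ≤ ·)) :
    ((owned.dropWhile (fun t => decide (t < z))).head? = some z) ↔ z ∈ owned := by
  induction owned with
  | nil => simp
  | cons a as ih =>
    have hfa := (List.pairwise_cons.mp how).1
    have has := (List.pairwise_cons.mp how).2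
    by_cases h : a < z
    · have hne : z ≠ a := by omega
      simp [h, ih has, hne]
    · simp only [List.dropWhile_cons]
      simp only [h, decide_false]
      simp only [Bool.false_eq_true, if_false, List.head?_cons, Option.some.injEq, List.mem_cons]
      constructor
      · intro hh; exact Or.inl hh.symm
      · rintro (hh | hh)
        · exact hh.symm
        · have := hfa z hh; omega

-- B-side: the two-pointer sweep returns exactly the distinct zone values absent from
-- `owned`, in strictly increasing order.
theorem pvMergeDiff_spec (zs : List Int) :
    ∀ (owned : List Int) (prev : Option Int),
    zs.Pairwise (· ≤ ·) → owned.Pairwise (· ≤ ·) →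
    (∀ p, prev = some p → ∀ y ∈ zs, p ≤ y) →
    (∀ x, x ∈ pvMergeDiff zs owned prev ↔ x ∈ zs ∧ x ∉ owned ∧ prev ≠ some x)
    ∧ (pvMergeDiff zs owned prev).Pairwise (· < ·) := by
  induction zs with
  | nil => intro owned prev _ _ _; simp [pvMergeDiff]
  | cons z zs ih =>
    intro owned prev hz how hp
    have hz' : zs.Pairwise (· ≤ ·) := (List.pairwise_cons.mp hz).2
    have hzall : ∀ y ∈ zs, z ≤ y := (List.pairwise_cons.mp hz).1
    by_cases hpz : prev = some z
    · have hrec := ih owned prev hz' how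
        (fun p hpp y hy => hp p hpp y (List.mem_cons_of_mem _ hy))
      rw [pvMergeDiff]
      simp only [if_pos hpz]
      refine ⟨fun x => ?_, hrec.2⟩
      rw [hrec.1 x]
      constructor
      · rintro ⟨h1, h2, h3⟩; exact ⟨List.mem_cons_of_mem _ h1, h2, h3⟩
      · rintro ⟨h1, h2, h3⟩
        rcases List.mem_cons.mp h1 with h' | h'
        · exact absurd (hpz.trans (congrArg some h'.symm)) h3
        · exact ⟨h', h2, h3⟩
    · have how' : (owned.dropWhile (fun t => decide (t < z))).Pairwise (· ≤ ·) :=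
        List.Pairwise.sublist (List.dropWhile_sublist _) how
      have hrec := ih (owned.dropWhile (fun t => decide (t < z))) (some z) hz' how'
        (fun p hpp y hy => by cases hpp; exact hzall y hy)
      have hmem' : ∀ x, x ∈ pvMergeDiff zs (owned.dropWhile (fun t => decide (t < z))) (some z) ↔
          x ∈ zs ∧ x ∉ owned ∧ x ≠ z := by
        intro x
        rw [hrec.1 x]
        constructor
        · rintro ⟨h1, h2, h3⟩
          have hne : x ≠ z := fun he => h3 (congrArg some he.symm)
          have hzx : z ≤ x := hzall x h1
          exact ⟨h1, fun hm => h2 ((pv_mem_dropWhile_lt owned z x hzx).mpr hm), hne⟩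
        · rintro ⟨h1, h2, h3⟩
          have hzx : z ≤ x := hzall x h1
          refine ⟨h1, fun hm => h2 ((pv_mem_dropWhile_lt owned z x hzx).mp hm), ?_⟩
          intro he; injection he with he; exact h3 he.symm
      have hhead := pv_head_dropWhile_lt owned z how
      by_cases hh : (owned.dropWhile (fun t => decide (t < z))).head? = some z
      · -- z is owned: skipped
        have hzin : z ∈ owned := hhead.mp hh
        rw [pvMergeDiff]
        simp only [if_neg hpz, if_pos hh]
        refine ⟨fun x => ?_, hrec.2⟩
        rw [hmem' x]
        constructor
        · rintro ⟨h1, h2, h3⟩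
          refine ⟨List.mem_cons_of_mem _ h1, h2, ?_⟩
          intro he
          have hxz : x ≤ z := hp x he z (List.mem_cons_self ..)
          have hzx : z ≤ x := hzall x h1
          omega
        · rintro ⟨h1, h2, h3⟩
          rcases List.mem_cons.mp h1 with h' | h'
          · exact absurd (h' ▸ hzin) h2
          · refine ⟨h', h2, ?_⟩
            intro he; subst he; exact h2 hzin
      · -- z not owned: emitted
        have hzout : z ∉ owned := fun hm => hh (hhead.mpr hm)
        rw [pvMergeDiff]
        simp only [if_neg hpz, if_neg hh]
        constructor
        · intro x
          simp only [List.mem_cons]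
          rw [hmem' x]
          constructor
          · rintro (h' | ⟨h1, h2, h3⟩)
            · subst h'
              exact ⟨Or.inl rfl, hzout, hpz⟩
            · refine ⟨Or.inr h1, h2, ?_⟩
              intro he
              have hxz : x ≤ z := hp x he z (List.mem_cons_self ..)
              have hzx : z ≤ x := hzall x h1
              omega
          · rintro ⟨h1, h2, h3⟩
            rcases h1 with h' | h'
            · exact Or.inl h'
            · by_cases hxz : x = z
              · exact Or.inl hxz
              · exact Or.inr ⟨h', h2, hxz⟩
        · refine List.pairwise_cons.mpr ⟨?_, hrec.2⟩
          intro y hy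
          have hy' := (hmem' y).mp hy
          have hzy := hzall y hy'.1
          have hne := hy'.2.2
          omega

-- ===== VERDICT (by name: the statement is the Claim_ definition above) =====
theorem summarize_zone_membership_spec : Claim_equal_summarize_zone_membership := by
  intro zone_ids top_ids bottom_ids support_ids _
  show summarize_zone_membership zone_ids top_ids bottom_ids support_ids
      = summarize_zone_membership_alt zone_ids top_ids bottom_ids support_ids
  unfold summarize_zone_membership summarize_zone_membership_alt
  simp only [unique_eq_ofList, PySem.Set.ofList_ofList]
  have hzs : (PySem.List.sorted zone_ids (fun x => x) false).Pairwise (· ≤ ·) := by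
    have := PySem.List.sorted_pairwise (xs := zone_ids) (key := fun x => x)
    simpa using this
  have hos : (PySem.List.sorted (top_ids ++ bottom_ids ++ support_ids) (fun x => x) false).Pairwise (· ≤ ·) := by
    have := PySem.List.sorted_pairwise (xs := top_ids ++ bottom_ids ++ support_ids) (key := fun x => x)
    simpa using this
  have hmd := pvMergeDiff_spec (PySem.List.sorted zone_ids (fun x => x) false)
    (PySem.List.sorted (top_ids ++ bottom_ids ++ support_ids) (fun x => x) false) none
    hzs hos (fun p hpp => by cases hpp)
  set R := pvMergeDiff (PySem.List.sorted zone_ids (fun x => x) false)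
    (PySem.List.sorted (top_ids ++ bottom_ids ++ support_ids) (fun x => x) false) none with hR
  -- R is the strictly increasing enumeration of the filtered set; name it as the sorted list
  refine PySem.List.sorted_eq_of_perm_of_pairwise_lt _ R _ ?_ (by simpa using hmd.2)
  have hndR : R.Nodup := hmd.2.imp (fun h => ne_of_lt h)
  have hndF : ((PySem.Set.ofList zone_ids).filter (fun int_id =>
      !((((PySem.Set.ofList top_ids).update (PySem.Set.ofList bottom_ids)).update
        (PySem.Set.ofList support_ids)).contains int_id))).Nodup :=
    (PySem.Set.nodup_ofList zone_ids).filter _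
  rw [List.perm_ext_iff_of_nodup hndR hndF]
  intro a
  rw [hmd.1 a]
  simp [PySem.List.mem_sorted, PySem.Set.mem_update, PySem.Set.mem_ofList, List.mem_filter,
    PySem.Set.mem_ofList]
  tauto
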